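-- pv_equiv track=rewrite | github.com/Thanhtinh06/baitapbigo | Bai5/check_study_hour.py | check_study_hour
-- ===== SOURCE A (Python) =====
-- def check_study_hour(n, a):
--     count = 0
--     for i in range(n):
--         if a[i] == 0:
--             count += 1
--         else:
--             count = 0
--         if count > 3:
--             return False
--     return count == 0
-- ===== SOURCE B (Python) =====
-- def check_study_hour(n, a):
--     xs = [a[i] for i in range(n)]
--     runs = []
--     for x in xs:
--         if runs and runs[-1][0] == x:
--             v, k = runs[-1]
--             runs[-1] = (v, k + 1)
--         else:
--             runs.append((x, 1))
--     for v, k in runs: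
--         if v == 0 and k > 3:
--             return False
--     return (not xs) or xs[-1] != 0
-- ===== Notes on version B (the rewrite author's own statement) =====
-- stated objective: alternative
-- what changed: Replaces A's resettable counter with early return by materialising the examined prefix, run-length encoding it, rejecting any zero-run longer than 3, and finally testing the last element.
import Mathlib
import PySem

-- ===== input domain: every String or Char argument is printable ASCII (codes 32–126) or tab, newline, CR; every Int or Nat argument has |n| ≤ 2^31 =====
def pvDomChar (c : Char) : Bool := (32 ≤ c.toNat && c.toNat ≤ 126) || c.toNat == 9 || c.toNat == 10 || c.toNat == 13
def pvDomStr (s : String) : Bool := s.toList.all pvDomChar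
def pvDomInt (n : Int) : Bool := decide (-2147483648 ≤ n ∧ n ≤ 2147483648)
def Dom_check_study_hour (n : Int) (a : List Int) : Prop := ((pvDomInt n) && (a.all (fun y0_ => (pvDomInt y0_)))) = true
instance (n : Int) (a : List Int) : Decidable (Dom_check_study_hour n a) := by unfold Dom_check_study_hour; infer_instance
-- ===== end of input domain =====

-- B re-implements A's resettable zero-counter as a run-length encoding of the examined
-- prefix followed by a scan of the runs and a last-element test (alternative decomposition,
-- same asymptotic cost).

-- ===== PORT A =====
-- the for-loop over range(n) with early `return False`: recursion over the index list
def pvLoopA (a : List Int) : List Int → Int → Bool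
  | [], count => count == 0
  | i :: is, count =>
    let count' := if (PySem.List.pyGet? a i).getD 0 == 0 then count + 1 else 0
    if count' > 3 then false else pvLoopA a is count'

def check_study_hour (n : Int) (a : List Int) : Bool :=
  pvLoopA a (PySem.List.pyRange 0 n 1) 0

-- ===== PORT B =====
-- one step of B's run-building loop: extend the last run or start a new one
def pvStep (rs : List (Int × Int)) (x : Int) : List (Int × Int) :=
  match rs.getLast? with
  | some (v, k) => if v == x then rs.dropLast ++ [(v, k + 1)] else rs ++ [(x, 1)]
  | none => rs ++ [(x, 1)]

-- B's second for-loop: `return False` as soon as a zero-run longer than 3 is seen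
def pvBad (rs : List (Int × Int)) : Bool := rs.any (fun p => p.1 == 0 && decide ((3:Int) < p.2))

def check_study_hour_alt (n : Int) (a : List Int) : Bool :=
  let xs := (PySem.List.pyRange 0 n 1).map (fun i => (PySem.List.pyGet? a i).getD 0)
  let runs := xs.foldl pvStep []
  if pvBad runs then false
  else xs.isEmpty || ((PySem.List.pyGet? xs (-1)).getD 0 != 0)

-- ===== PRECONDITION & SPEC =====
-- Pre_ excludes exactly the inputs where Python A raises IndexError: n > len(a)
-- (for n ≤ len(a), including negative n, A returns normally).
def Pre_check_study_hour (n : Int) (a : List Int) : Prop := n ≤ (a.length : Int)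
instance (n : Int) (a : List Int) : Decidable (Pre_check_study_hour n a) := by
  unfold Pre_check_study_hour; infer_instance

def pvWitness_check_study_hour : Int × List Int := (3, [1, 0, 2])

def Spec_check_study_hour (n : Int) (a : List Int) (out : Bool) : Prop := out = check_study_hour_alt n a
instance (n : Int) (a : List Int) (out : Bool) : Decidable (Spec_check_study_hour n a out) := by
  unfold Spec_check_study_hour; infer_instance

-- ===== CLAIM (what is proved, stated in full; the proofs are below) =====
def Claim_equal_check_study_hour : Prop := ∀ (n : Int) (a : List Int), Dom_check_study_hour n a → Pre_check_study_hour n a → Spec_check_study_hour n a (check_study_hour n a)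

-- ===== LEMMAS AND PROOFS =====

-- A's loop expressed on the fetched values
def pvRunA : List Int → Int → Bool
  | [], c => c == 0
  | x :: t, c =>
    let c' := if x == 0 then c + 1 else 0
    if c' > 3 then false else pvRunA t c'

-- run-length encoding with an open current run (v, k)
def pvGo (v k : Int) : List Int → List (Int × Int)
  | [] => [(v, k)]
  | y :: ys => if v == y then pvGo v (k + 1) ys else (v, k) :: pvGo y 1 ys

lemma pvLoopA_eq_runA (a : List Int) (idxs : List Int) (c : Int) :
    pvLoopA a idxs c = pvRunA (idxs.map (fun i => (PySem.List.pyGet? a i).getD 0)) c := by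
  induction idxs generalizing c with
  | nil => simp [pvLoopA, pvRunA]
  | cons i is ih => simp only [pvLoopA, pvRunA, List.map]; split <;> simp [ih]

lemma pvFoldl_step (ys : List Int) (rs0 : List (Int × Int)) (v k : Int) :
    List.foldl pvStep (rs0 ++ [(v, k)]) ys = rs0 ++ pvGo v k ys := by
  induction ys generalizing rs0 v k with
  | nil => simp [pvGo]
  | cons y t ih =>
    simp only [List.foldl, pvStep, List.getLast?_concat, List.dropLast_concat]
    by_cases h : v = y
    · subst h
      rw [if_pos (by simp), ih]
      simp [pvGo]
    · rw [if_neg (by simpa using h), ih]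
      simp [pvGo, h, List.append_assoc]

lemma pvGo_bad_of_big (t : List Int) (k : Int) (hk : 3 < k) :
    pvBad (pvGo 0 k t) = true := by
  induction t generalizing k with
  | nil => simp [pvGo, pvBad]; omega
  | cons y t ih =>
    by_cases h : (0 : Int) = y
    · rw [show pvGo 0 k (y :: t) = pvGo 0 (k + 1) t by simp [pvGo, h]]
      exact ih (k + 1) (by omega)
    · rw [show pvGo 0 k (y :: t) = (0, k) :: pvGo y 1 t by simp [pvGo, h]]
      simp [pvBad]
      exact Or.inl hk

lemma pvLast_cons (y v : Int) (t : List Int) :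
    ((y :: t).getLast?.getD v) = t.getLast?.getD y := by
  cases t with
  | nil => rfl
  | cons z u =>
    rw [List.getLast?_cons_cons]
    cases h : (z :: u).getLast? with
    | none => simp at h
    | some w => simp

lemma pvRunA_eq_go (ys : List Int) (v k : Int) (hk : 1 ≤ k) (hv : v = 0 → k ≤ 3) :
    pvRunA ys (if v = 0 then k else 0) =
      ((!(pvBad (pvGo v k ys))) && (ys.getLast?.getD v != 0)) := by
  induction ys generalizing v k with
  | nil =>
    by_cases hv0 : v = 0
    · have h3 : ¬ ((3:Int) < k) := by omega
      simp [hv0, pvRunA, pvGo, pvBad, h3]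
      omega
    · simp [hv0, pvRunA, pvGo, pvBad]
  | cons y t ih =>
    rw [pvLast_cons]
    by_cases hvy : v = y
    · subst hvy
      rw [show pvGo v k (v :: t) = pvGo v (k + 1) t by simp [pvGo]]
      by_cases hv0 : v = 0
      · subst hv0
        by_cases hk3 : (3:Int) < k + 1
        · rw [pvGo_bad_of_big t (k + 1) hk3]
          simp [pvRunA, hk3]
        · have h := ih 0 (k + 1) (by omega) (fun _ => by omega)
          simp only [if_pos] at h
          simp [pvRunA, hk3]
          simpa using h
      · have h := ih v (k + 1) (by omega) (fun h => absurd h hv0)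
        rw [if_neg hv0] at h
        simp [pvRunA, hv0]
        simpa using h
    · rw [show pvGo v k (y :: t) = (v, k) :: pvGo y 1 t by simp [pvGo, hvy]]
      have hbadhead : ((v == (0:Int)) && decide ((3:Int) < k)) = false := by
        by_cases hv0 : v = 0
        · have := hv hv0; simp [hv0]; omega
        · simp [hv0]
      have hbd : pvBad ((v, k) :: pvGo y 1 t) = pvBad (pvGo y 1 t) := by
        simp [pvBad, hbadhead]
      rw [hbd]
      have hih := ih y 1 (by omega) (fun _ => by omega)
      by_cases hy0 : y = 0
      · subst hy0
        simp only [if_pos] at hih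
        have hne : v ≠ 0 := fun h => hvy (h.trans rfl)
        simp [pvRunA, hne]
        simpa using hih
      · rw [if_neg hy0] at hih
        simp [pvRunA, hy0]
        simpa using hih

-- ===== VERDICT (by name: the statement is the Claim_ definition above) =====
theorem check_study_hour_spec : Claim_equal_check_study_hour := by
  intro n a _ _
  unfold Spec_check_study_hour check_study_hour check_study_hour_alt
  rw [pvLoopA_eq_runA]
  set xs := (PySem.List.pyRange 0 n 1).map (fun i => (PySem.List.pyGet? a i).getD 0) with hxs
  clear hxs
  cases xs with
  | nil => simp [pvRunA, pvBad]
  | cons x t =>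
    have hstep : pvStep [] x = [(x, 1)] := by simp [pvStep]
    have hfold : List.foldl pvStep [] (x :: t) = pvGo x 1 t := by
      simp only [List.foldl, hstep]
      have := pvFoldl_step t [] x 1
      simpa using this
    have hrun : pvRunA (x :: t) 0 = pvRunA t (if x = 0 then 1 else 0) := by
      by_cases hx : x = 0 <;> simp [pvRunA, hx]
    rw [hrun]
    show pvRunA t (if x = 0 then 1 else 0) =
      (if pvBad (List.foldl pvStep [] (x :: t)) then false
       else ((x :: t).isEmpty || ((PySem.List.pyGet? (x :: t) (-1)).getD 0 != 0)))
    rw [hfold, pvRunA_eq_go t x 1 (by omega) (fun _ => by omega),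
        PySem.List.pyGet?_neg_one, pvLast_cons x 0 t]
    simp only [List.isEmpty_cons, Bool.false_or]
    by_cases hb : pvBad (pvGo x 1 t) = true <;> simp [hb]
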